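-- pv_equiv track=rewrite | github.com/rowan-sl/cli-blockgame | code/utils/sliding_window.py | get_window_into_area
-- ===== SOURCE A (Python) =====
-- from typing import List, TypeVar
--
-- T = TypeVar("T")
--
-- def get_window_into_area(
--     area: List[List[T]], bottom: int, left: int, top: int, right: int
-- ) -> List[List[T]]:
--     new_area = []
--     max_x = len(area[0]) - 1
--     max_y = len(area) - 1
--
--     width_x = right - left
--     width_y = top - bottom
--
--     if bottom < 0:
--         bottom = 0
--         top = width_y
--     if top > max_y:
--         top = max_y
--         bottom = max_y - width_y
--     if left < 0:
--         left = 0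
--         right = width_x
--     if right > max_x:
--         right = max_x
--         left = max_x - width_x
--
--     assert bottom >= 0
--     assert left >= 0
--     assert top <= max_y
--     assert right <= max_x
--
--     for y, line in enumerate(reversed(area)):
--         if y <= top:
--             if y >= bottom:
--                 new_area.append(line[left : right + 1])
--
--     return list(reversed(new_area))
-- ===== SOURCE B (Python) =====
-- def _clamp(lo, hi, maxc):
--     w = hi - lo
--     if lo < 0:
--         lo, hi = 0, w
--     if hi > maxc:
--         lo, hi = maxc - w, maxc
--     return lo, hi
--
-- def get_window_into_area(area, bottom, left, top, right):
--     max_y = len(area) - 1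
--     max_x = len(area[0]) - 1
--     bottom, top = _clamp(bottom, top, max_y)
--     left, right = _clamp(left, right, max_x)
--     assert bottom >= 0
--     assert left >= 0
--     assert top <= max_y
--     assert right <= max_x
--     out = []
--     y = max_y - top
--     end = max_y - bottom
--     while y <= end:
--         out.append(area[y][left:right + 1])
--         y += 1
--     return out
-- ===== Notes on version B (the rewrite author's own statement) =====
-- stated objective: simpler
-- what changed: A scans all of reversed(area) with enumerate, filters rows by a two-sided if-window and reverses the collected list; B factors the clamping into one reusable per-axis helper and then walks only the window rows top-down with a direct index loop over the original (unreversed) area, so there is no full scan, no filter and no final reverse.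
import Mathlib
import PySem

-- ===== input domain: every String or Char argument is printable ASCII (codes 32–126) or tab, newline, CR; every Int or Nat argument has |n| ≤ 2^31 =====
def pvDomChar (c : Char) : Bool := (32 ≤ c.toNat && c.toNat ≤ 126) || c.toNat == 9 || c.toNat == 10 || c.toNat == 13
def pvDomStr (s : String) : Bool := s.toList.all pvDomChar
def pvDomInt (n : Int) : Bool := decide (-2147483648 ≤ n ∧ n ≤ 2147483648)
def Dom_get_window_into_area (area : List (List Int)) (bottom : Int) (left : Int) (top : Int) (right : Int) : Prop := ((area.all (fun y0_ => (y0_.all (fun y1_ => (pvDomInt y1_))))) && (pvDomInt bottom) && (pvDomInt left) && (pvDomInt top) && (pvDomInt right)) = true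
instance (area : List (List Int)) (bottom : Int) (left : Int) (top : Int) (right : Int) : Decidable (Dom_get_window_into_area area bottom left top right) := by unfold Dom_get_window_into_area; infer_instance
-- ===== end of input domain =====

-- B replaces A's full scan of reversed(area) (enumerate + two-sided filter + final reverse)
-- by a shared per-axis clamping helper and a direct index walk over only the window rows of
-- the original area (objective: simpler; return value only — neither version mutates its arguments).

-- ===== PORT A =====
def get_window_into_area (area : List (List Int)) (bottom : Int) (left : Int) (top : Int) (right : Int) : List (List Int) :=
  let max_x : Int := ((area.headD []).length : Int) - 1   -- area[0]: Pre_ excludes area = [] (IndexError)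
  let max_y : Int := (area.length : Int) - 1
  let width_x : Int := right - left
  let width_y : Int := top - bottom
  let bt : Int × Int := if bottom < 0 then ((0 : Int), width_y) else (bottom, top)
  let bt2 : Int × Int := if bt.2 > max_y then (max_y - width_y, max_y) else bt
  let lr : Int × Int := if left < 0 then ((0 : Int), width_x) else (left, right)
  let lr2 : Int × Int := if lr.2 > max_x then (max_x - width_x, max_x) else lr
  -- the four asserts hold exactly on Pre_
  let new_area : List (List Int) := (PySem.List.enumerate area.reverse).foldl
    (fun acc p =>
      if p.1 ≤ bt2.2 then
        (if p.1 ≥ bt2.1 then acc ++ [PySem.List.slice p.2 (some lr2.1) (some (lr2.2 + 1))] else acc)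
      else acc) []
  new_area.reverse

-- ===== PORT B =====
-- _clamp(lo, hi, maxc): the per-axis clamping helper of Source B
def pvClamp (lo hi maxc : Int) : Int × Int :=
  let w : Int := hi - lo
  let p : Int × Int := if lo < 0 then ((0 : Int), w) else (lo, hi)
  if p.2 > maxc then (maxc - w, maxc) else p

-- the 'while y <= end' loop of Source B, as fuel recursion on the remaining count end - y + 1;
-- area[y] is in range on every admitted input, so .getD [] is exact there
def pvRows (area : List (List Int)) (l r : Int) (y : Int) (fuel : Nat) : List (List Int) :=
  match fuel with
  | 0 => []
  | Nat.succ f =>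
      PySem.List.slice ((PySem.List.pyGet? area y).getD []) (some l) (some (r + 1))
        :: pvRows area l r (y + 1) f

def get_window_into_area_alt (area : List (List Int)) (bottom : Int) (left : Int) (top : Int) (right : Int) : List (List Int) :=
  let max_y : Int := (area.length : Int) - 1
  let max_x : Int := ((area.headD []).length : Int) - 1
  let bt : Int × Int := pvClamp bottom top max_y
  let lr : Int × Int := pvClamp left right max_x
  let y : Int := max_y - bt.2
  let endi : Int := max_y - bt.1
  pvRows area lr.1 lr.2 y (endi - y + 1).toNat

-- ===== PRECONDITION & SPEC =====
-- Pre_ excludes exactly the inputs on which A raises: empty area (IndexError on area[0])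
-- and inputs on which one of A's four asserts fails after clamping (AssertionError).
def Pre_get_window_into_area (area : List (List Int)) (bottom : Int) (left : Int) (top : Int) (right : Int) : Prop :=
  area ≠ [] ∧
  (let max_x : Int := ((area.headD []).length : Int) - 1
   let max_y : Int := (area.length : Int) - 1
   let width_x : Int := right - left
   let width_y : Int := top - bottom
   let bt : Int × Int := if bottom < 0 then ((0 : Int), width_y) else (bottom, top)
   let bt2 : Int × Int := if bt.2 > max_y then (max_y - width_y, max_y) else bt
   let lr : Int × Int := if left < 0 then ((0 : Int), width_x) else (left, right)
   let lr2 : Int × Int := if lr.2 > max_x then (max_x - width_x, max_x) else lr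
   0 ≤ bt2.1 ∧ 0 ≤ lr2.1 ∧ bt2.2 ≤ max_y ∧ lr2.2 ≤ max_x)
instance (area : List (List Int)) (bottom : Int) (left : Int) (top : Int) (right : Int) : Decidable (Pre_get_window_into_area area bottom left top right) := by unfold Pre_get_window_into_area; infer_instance

def pvWitness_get_window_into_area : List (List Int) × Int × Int × Int × Int := ([[1, 2], [3, 4]], 0, 0, 1, 1)

def Spec_get_window_into_area (area : List (List Int)) (bottom : Int) (left : Int) (top : Int) (right : Int) (out : List (List Int)) : Prop := out = get_window_into_area_alt area bottom left top right
instance (area : List (List Int)) (bottom : Int) (left : Int) (top : Int) (right : Int) (out : List (List Int)) : Decidable (Spec_get_window_into_area area bottom left top right out) := by unfold Spec_get_window_into_area; infer_instance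

-- ===== CLAIM (what is proved, stated in full; the proofs are below) =====
def Claim_equal_get_window_into_area : Prop := ∀ (area : List (List Int)) (bottom : Int) (left : Int) (top : Int) (right : Int), Dom_get_window_into_area area bottom left top right → Pre_get_window_into_area area bottom left top right → Spec_get_window_into_area area bottom left top right (get_window_into_area area bottom left top right)

-- ===== LEMMAS AND PROOFS =====

-- A's loop over enumerate(reversed(area)) with the window filter collects exactly a
-- contiguous take/drop block of the traversed list.
theorem foldl_enum_window {α β : Type} (f : α → β) (b t : Int) :
    ∀ (l : List α) (s : Int) (init : List β),
      (PySem.List.enumerate l s).foldl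
        (fun acc p => if p.1 ≤ t then (if p.1 ≥ b then acc ++ [f p.2] else acc) else acc) init
      = init ++ ((l.take (t - s + 1).toNat).drop (b - s).toNat).map f := by
  intro l
  induction l with
  | nil => intro s init; simp [PySem.List.enumerate_nil]
  | cons x xs ih =>
    intro s init
    rw [PySem.List.enumerate_cons, List.foldl_cons, ih]
    by_cases h1 : s ≤ t
    · have hm : (t - s + 1).toNat = (t - (s + 1) + 1).toNat + 1 := by omega
      rw [hm, List.take_succ_cons]
      by_cases h2 : s ≥ b
      · have hb0 : (b - s).toNat = 0 := by omega
        have hb1 : (b - (s + 1)).toNat = 0 := by omega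
        simp [h1, h2, hb0, hb1]
      · have hb0 : (b - s).toNat = (b - (s + 1)).toNat + 1 := by omega
        simp [h1, h2, hb0]
    · have hm : (t - s + 1).toNat = 0 := by omega
      have hm1 : (t - (s + 1) + 1).toNat = 0 := by omega
      simp [h1, hm, hm1]

-- reversed(filtered scan of reversed(area)) is the contiguous drop/take block of area
theorem window_core {α β : Type} (f : α → β) (area : List α) (b t : Int)
    (hb : 0 ≤ b) (ht : t ≤ (area.length : Int) - 1) :
    ((PySem.List.enumerate area.reverse).foldl
        (fun acc p => if p.1 ≤ t then (if p.1 ≥ b then acc ++ [f p.2] else acc) else acc) []).reverse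
    = ((area.drop ((area.length : Int) - 1 - t).toNat).take (t - b + 1).toNat).map f := by
  rw [foldl_enum_window f b t area.reverse 0 []]
  simp only [List.nil_append, sub_zero]
  by_cases hbt : b > t
  · have h1 : ((area.reverse.take (t + 1).toNat).drop (b).toNat) = [] := by
      apply List.drop_eq_nil_of_le
      have := List.length_take_le (t + 1).toNat area.reverse
      omega
    have h2 : (t - b + 1).toNat = 0 := by omega
    simp [h1, h2]
  · rw [List.take_reverse, List.drop_reverse, List.map_reverse, List.reverse_reverse]
    have h3 : area.length - (t + 1).toNat = ((area.length : Int) - 1 - t).toNat := by omega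
    rw [h3]
    have h4 : (List.drop ((area.length : Int) - 1 - t).toNat area).length - b.toNat
        = (t - b + 1).toNat := by
      simp only [List.length_drop]; omega
    rw [h4]

-- B's index loop collects exactly a contiguous drop/take block of area
theorem pvRows_eq (area : List (List Int)) (l r : Int) :
    ∀ (n : Nat) (y : Int), 0 ≤ y → y.toNat + n ≤ area.length →
      pvRows area l r y n
      = ((area.drop y.toNat).take n).map
          (fun row => PySem.List.slice row (some l) (some (r + 1))) := by
  intro n
  induction n with
  | zero => intro y _ _; rfl
  | succ f ih =>
    intro y hy hlen
    have hylt : y.toNat < area.length := by omega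
    have hget : PySem.List.pyGet? area y = some area[y.toNat] := by
      rw [PySem.List.pyGet?_of_nonneg area hy]; exact List.getElem?_eq_getElem hylt
    have hdrop : area.drop y.toNat = area[y.toNat] :: area.drop (y.toNat + 1) :=
      List.drop_eq_getElem_cons hylt
    have hy1 : (y + 1).toNat = y.toNat + 1 := by omega
    rw [pvRows, hget, hdrop, List.take_succ_cons, List.map_cons,
        ih (y + 1) (by omega) (by omega), hy1]
    rfl

-- combine: A's reversed filtered scan equals B's index loop, for clamped bounds b t l r
theorem main_eq (area : List (List Int)) (b t l r : Int)
    (hb : 0 ≤ b) (ht : t ≤ (area.length : Int) - 1) :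
    ((PySem.List.enumerate area.reverse).foldl
        (fun acc p => if p.1 ≤ t then
            (if p.1 ≥ b then acc ++ [PySem.List.slice p.2 (some l) (some (r + 1))] else acc)
          else acc) []).reverse
    = pvRows area l r ((area.length : Int) - 1 - t)
        (((area.length : Int) - 1 - b) - ((area.length : Int) - 1 - t) + 1).toNat := by
  rw [window_core (fun row => PySem.List.slice row (some l) (some (r + 1))) area b t hb ht]
  by_cases hbt : b ≤ t
  · rw [pvRows_eq area l r _ ((area.length : Int) - 1 - t) (by omega) (by omega)]
    congr 2
    omega
  · have hA : (t - b + 1).toNat = 0 := by omega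
    have hB : (((area.length : Int) - 1 - b) - ((area.length : Int) - 1 - t) + 1).toNat = 0 := by
      omega
    rw [hA, hB]
    rfl

-- ===== VERDICT (by name: the statement is the Claim_ definition above) =====
theorem get_window_into_area_spec : Claim_equal_get_window_into_area := by
  intro area bottom left top right _hdom hpre
  unfold Spec_get_window_into_area
  simp only [Pre_get_window_into_area] at hpre
  obtain ⟨hne, h1, h2, h3, h4⟩ := hpre
  simp only [get_window_into_area, get_window_into_area_alt, pvClamp]
  exact main_eq area _ _ _ _ h1 h3
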